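-- pv_equiv track=rewrite | github.com/elarcanista/CP-Solutions | HackerRank/ProjectEuler+/039.py | cum_max
-- ===== SOURCE A (Python) =====
-- def cum_max(S):
--     S_max = [0] * len(S)
--     for i in range(1, len(S)):
--         if S[i] > S[S_max[i-1]]:
--             S_max[i] = i
--         else:
--             S_max[i] = S_max[i-1]
--     return S_max
-- ===== SOURCE B (Python) =====
-- def cum_max(S):
--     # first occurrence index of every value
--     first = {}
--     for j, x in enumerate(S):
--         if x not in first:
--             first[x] = j
--     # running maximum VALUES
--     prefix = []
--     m = None
--     for x in S:
--         m = x if m is None or x > m else m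
--         prefix.append(m)
--     # the argmax with earliest-tie rule is the first occurrence of the prefix max value
--     return [first[m] for m in prefix]
-- ===== Notes on version B (the rewrite author's own statement) =====
-- stated objective: alternative
-- what changed: Replaces A's single indexed pass that threads the running argmax through the output array with a staged value-based algorithm: build a first-occurrence hash map value->index, compute the running-maximum VALUES, then map each prefix-max value to its first occurrence (which is exactly the earliest argmax).
import Mathlib
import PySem

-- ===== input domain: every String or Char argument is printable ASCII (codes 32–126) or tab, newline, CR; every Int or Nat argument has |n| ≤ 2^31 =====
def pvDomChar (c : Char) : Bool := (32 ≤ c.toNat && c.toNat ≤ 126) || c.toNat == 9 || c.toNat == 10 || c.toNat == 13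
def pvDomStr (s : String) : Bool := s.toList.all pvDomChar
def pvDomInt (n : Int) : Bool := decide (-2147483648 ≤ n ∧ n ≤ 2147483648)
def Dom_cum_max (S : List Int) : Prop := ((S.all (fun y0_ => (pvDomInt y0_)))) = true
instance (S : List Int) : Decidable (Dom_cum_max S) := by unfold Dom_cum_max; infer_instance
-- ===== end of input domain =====

-- B replaces A's indexed argmax-threading pass with a staged value-based algorithm:
-- a first-occurrence map value->index, the running-maximum VALUES, then a lookup per prefix.

-- ===== PORT A =====
-- all indices read/written are provably in range, so pyGetD/pySetD are exact here
def cum_max (S : List Int) : List Int :=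
  (PySem.List.pyRange 1 (S.length : Int) 1).foldl
    (fun acc i =>
      let prev := PySem.List.pyGetD acc (i - 1) 0
      PySem.List.pySetD acc i
        (if PySem.List.pyGetD S i 0 > PySem.List.pyGetD S prev 0 then i else prev))
    (List.replicate S.length 0)

-- ===== PORT B =====
-- Source B's first loop: first-occurrence dict value -> index
def cmFirstDict (S : List Int) : PySem.Dict Int Int :=
  (PySem.List.enumerate S 0).foldl
    (fun d p => if d.contains p.2 then d else d.insert p.2 p.1) PySem.Dict.empty

-- Source B's second loop: running-maximum values (m threaded as an Option accumulator)
def cmPrefixMax (S : List Int) : List Int :=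
  (S.foldl
    (fun (st : Option Int × List Int) x =>
      let m := match st.1 with
        | none => x
        | some a => if x > a then x else a
      (some m, st.2 ++ [m]))
    ((none : Option Int), ([] : List Int))).2

-- first[m]: the key is always present (every prefix max occurs in S), so getD is exact here
def cum_max_alt (S : List Int) : List Int :=
  (cmPrefixMax S).map (fun m => PySem.Dict.getD (cmFirstDict S) m 0)

-- ===== PRECONDITION & SPEC =====
def Spec_cum_max (S : List Int) (out : List Int) : Prop := out = cum_max_alt S
instance (S : List Int) (out : List Int) : Decidable (Spec_cum_max S out) := by unfold Spec_cum_max; infer_instance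

-- ===== CLAIM (what is proved, stated in full; the proofs are below) =====
def Claim_equal_cum_max : Prop := ∀ (S : List Int), Dom_cum_max S → Spec_cum_max S (cum_max S)

-- ===== LEMMAS AND PROOFS =====

-- the index of the maximum of S[0..k] (first occurrence)
def bestIdx (S : List Int) : Nat → Nat
  | 0 => 0
  | k + 1 => if S.getD (k + 1) 0 > S.getD (bestIdx S k) 0 then k + 1 else bestIdx S k

theorem bestIdx_le (S : List Int) (j : Nat) : bestIdx S j ≤ j := by
  induction j with
  | zero => simp [bestIdx]
  | succ k ih => unfold bestIdx; split <;> omega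

theorem bestIdx_max (S : List Int) (j i : Nat) (h : i ≤ j) :
    S.getD i 0 ≤ S.getD (bestIdx S j) 0 := by
  induction j with
  | zero => interval_cases i; simp [bestIdx]
  | succ k ih =>
    unfold bestIdx
    rcases Nat.eq_or_lt_of_le h with h1 | h1
    · subst h1; split <;> omega
    · have := ih (by omega); split <;> omega

theorem bestIdx_first (S : List Int) (j i : Nat) (h : i < bestIdx S j) :
    S.getD i 0 < S.getD (bestIdx S j) 0 := by
  induction j with
  | zero => simp [bestIdx] at h
  | succ k ih =>
    revert h; unfold bestIdx; split
    · intro h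
      have hle : S.getD i 0 ≤ S.getD (bestIdx S k) 0 := by
        have hik : i ≤ k := by have := bestIdx_le S k; omega
        exact bestIdx_max S k i hik
      omega
    · exact ih

-- ===== B-side: the prefix-max fold yields the values at the best indices =====
theorem pm_inv (S : List Int) (k : Nat) (hk : k ≤ S.length) :
    (S.take k).foldl
      (fun (st : Option Int × List Int) x =>
        let m := match st.1 with
          | none => x
          | some a => if x > a then x else a
        (some m, st.2 ++ [m]))
      ((none : Option Int), ([] : List Int))
    = ((if k = 0 then none else some (S.getD (bestIdx S (k - 1)) 0)),
       (List.range k).map (fun j => S.getD (bestIdx S j) 0)) := by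
  induction k with
  | zero => simp
  | succ k ih =>
    have hk' : k ≤ S.length := Nat.le_of_succ_le hk
    have htake : S.take (k + 1) = S.take k ++ [S.getD k 0] := by
      rw [List.take_add_one]
      have : S[k]? = some (S.getD k 0) := by
        rw [List.getD_eq_getElem _ _ (show k < S.length by omega),
          List.getElem?_eq_getElem]
      rw [this]; rfl
    rw [htake, List.foldl_append, ih hk']
    simp only [List.foldl_cons, List.foldl_nil]
    cases k with
    | zero => simp [bestIdx]
    | succ m =>
      simp only [if_neg (Nat.succ_ne_zero m), if_neg (Nat.succ_ne_zero (m + 1)),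
        Nat.add_sub_cancel]
      have hval : (if S.getD (m + 1) 0 > S.getD (bestIdx S m) 0
            then S.getD (m + 1) 0 else S.getD (bestIdx S m) 0)
          = S.getD (bestIdx S (m + 1)) 0 := by
        conv_rhs => rw [bestIdx]
        simp only [List.getD_eq_getElem?_getD, gt_iff_lt]
        split <;> rfl
      rw [hval]
      simp [List.range_succ]

theorem cmPrefixMax_eq (S : List Int) :
    cmPrefixMax S = (List.range S.length).map (fun j => S.getD (bestIdx S j) 0) := by
  unfold cmPrefixMax
  rw [← List.take_length (l := S), pm_inv S S.length le_rfl]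
  simp

-- ===== B-side: the dict fold computes first occurrences =====
theorem fold_first (L : List (Int × Int)) (d : PySem.Dict Int Int) (v : Int) :
    (L.foldl (fun d p => if d.contains p.2 then d else d.insert p.2 p.1) d).get? v
    = (match d.get? v with
       | some w => some w
       | none => (L.find? (fun p => p.2 == v)).map (·.1)) := by
  induction L generalizing d with
  | nil => cases hd : d.get? v <;> simp [hd]
  | cons p L ih =>
    obtain ⟨i, x⟩ := p
    simp only [List.foldl_cons, List.find?_cons]
    by_cases hvx : x = v
    · subst hvx
      by_cases hc : d.contains x
      · rw [if_pos hc, ih]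
        have : (d.get? x).isSome := by rw [← PySem.Dict.contains_eq_isSome_get?]; exact hc
        obtain ⟨w, hw⟩ := Option.isSome_iff_exists.mp this
        simp [hw]
      · rw [if_neg hc, ih]
        have hnone : d.get? x = none := by
          rw [PySem.Dict.get?_eq_none_iff_contains]
          simpa using hc
        rw [PySem.Dict.get?_insert_self]
        simp [hnone]
    · have hstep : (if d.contains x then d else d.insert x i).get? v = d.get? v := by
        split
        · rfl
        · rw [PySem.Dict.get?_insert]
          simp [Ne.symm hvx]
      rw [ih, hstep]
      have : ((x == v) : Bool) = false := by simpa using hvx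
      simp [this]

theorem find?_enum (S : List Int) (s v : Int) (i : Nat) (hi : i < S.length)
    (hv : S.getD i 0 = v) (hfirst : ∀ i' < i, S.getD i' 0 ≠ v) :
    (PySem.List.enumerate S s).find? (fun p => p.2 == v) = some (s + (i : Int), v) := by
  induction S generalizing s i with
  | nil => simp at hi
  | cons x T ih =>
    rw [PySem.List.enumerate_cons, List.find?_cons]
    by_cases hx : x = v
    · have hi0 : i = 0 := by
        by_contra h0
        obtain ⟨i', rfl⟩ : ∃ i', i = i' + 1 := ⟨i - 1, by omega⟩
        exact hfirst 0 (by omega) (by simpa using hx)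
      subst hi0; subst hx
      simp
    · have hi0 : i ≠ 0 := by
        intro h; subst h
        exact hx (by simpa using hv)
      obtain ⟨i', rfl⟩ : ∃ i', i = i' + 1 := ⟨i - 1, by omega⟩
      have : ((x == v) : Bool) = false := by simpa using hx
      rw [this]
      have := ih (s + 1) i' (by simpa using hi) (by simpa using hv)
        (fun j hj => by simpa using hfirst (j + 1) (by omega))
      rw [this]
      congr 1
      push_cast
      ring_nf

theorem firstDict_getD (S : List Int) (j : Nat) (hj : j < S.length) :
    PySem.Dict.getD (cmFirstDict S) (S.getD (bestIdx S j) 0) 0 = ((bestIdx S j : Nat) : Int) := by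
  have hb : bestIdx S j < S.length := lt_of_le_of_lt (bestIdx_le S j) hj
  have hget : (cmFirstDict S).get? (S.getD (bestIdx S j) 0)
      = some ((bestIdx S j : Nat) : Int) := by
    unfold cmFirstDict
    rw [fold_first]
    rw [PySem.Dict.get?_empty]
    rw [find?_enum S 0 _ (bestIdx S j) hb rfl
      (fun i' hi' => ne_of_lt (bestIdx_first S j i' hi'))]
    simp
  rw [PySem.Dict.getD_eq_get?_getD, hget]
  rfl

theorem alt_eq_map (S : List Int) :
    cum_max_alt S = (List.range S.length).map (fun j => ((bestIdx S j : Nat) : Int)) := by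
  unfold cum_max_alt
  rw [cmPrefixMax_eq, List.map_map]
  refine List.map_congr_left (fun j hj => ?_)
  have hj' : j < S.length := List.mem_range.mp hj
  exact firstDict_getD S j hj'

-- ===== A-side invariant =====
theorem a_invariant (S : List Int) (k : Nat) (hk1 : 1 ≤ k) (hk : k ≤ S.length) :
    (PySem.List.pyRange 1 (k : Int) 1).foldl
      (fun acc i =>
        let prev := PySem.List.pyGetD acc (i - 1) 0
        PySem.List.pySetD acc i
          (if PySem.List.pyGetD S i 0 > PySem.List.pyGetD S prev 0 then i else prev))
      (List.replicate S.length 0)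
    = (List.range k).map (fun j => ((bestIdx S j : Nat) : Int))
      ++ List.replicate (S.length - k) 0 := by
  induction k with
  | zero => omega
  | succ k ih =>
    cases Nat.eq_or_lt_of_le hk1 with
    | inl h1 =>
      have hk0 : k = 0 := by omega
      subst hk0
      rw [PySem.List.pyRange_one_eq_nil (by norm_num)]
      simp only [List.foldl_nil]
      have hs : 1 ≤ S.length := hk
      rw [show S.length = 1 + (S.length - 1) by omega, List.replicate_add]
      simp [bestIdx]
    | inr h1 =>
      have hk1' : 1 ≤ k := by omega
      have hk' : k ≤ S.length := Nat.le_of_succ_le hk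
      have hsplit : PySem.List.pyRange 1 ((k : Int) + 1) 1
          = PySem.List.pyRange 1 (k : Int) 1 ++ [(k : Int)] :=
        PySem.List.pyRange_one_succ_right (by exact_mod_cast hk1')
      rw [show (((k + 1 : Nat) : Int)) = ((k : Int) + 1) by push_cast; ring, hsplit,
        List.foldl_append, ih hk1' hk']
      simp only [List.foldl_cons, List.foldl_nil]
      set acc := (List.range k).map (fun j => ((bestIdx S j : Nat) : Int))
        ++ List.replicate (S.length - k) 0 with hacc
      have hlenpre : ((List.range k).map (fun j => ((bestIdx S j : Nat) : Int))).length = k := by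
        simp
      have hprev : PySem.List.pyGetD acc ((k : Int) - 1) 0
          = ((bestIdx S (k - 1) : Nat) : Int) := by
        have : ((k : Int) - 1) = (((k - 1 : Nat) : Nat) : Int) := by omega
        rw [this, PySem.List.pyGetD_natCast]
        rw [hacc, List.getD_append _ _ _ _ (by simp; omega)]
        rw [List.getD_eq_getElem _ _ (by simp; omega)]
        simp [List.getElem_map]
      rw [hprev]
      have hgb : PySem.List.pyGetD S ((bestIdx S (k - 1) : Nat) : Int) 0
          = S.getD (bestIdx S (k - 1)) 0 := PySem.List.pyGetD_natCast ..
      have hgk : PySem.List.pyGetD S ((k : Nat) : Int) 0 = S.getD k 0 :=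
        PySem.List.pyGetD_natCast ..
      have hbest : (if PySem.List.pyGetD S ((k : Nat) : Int) 0 >
            PySem.List.pyGetD S ((bestIdx S (k - 1) : Nat) : Int) 0
          then ((k : Nat) : Int) else ((bestIdx S (k - 1) : Nat) : Int))
          = ((bestIdx S k : Nat) : Int) := by
        rw [hgb, hgk]
        obtain ⟨m, rfl⟩ : ∃ m, k = m + 1 := ⟨k - 1, by omega⟩
        simp only [Nat.add_sub_cancel, bestIdx, gt_iff_lt, List.getD_eq_getElem?_getD]
        split <;> simp
      rw [hbest]
      rw [PySem.List.pySetD_natCast]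
      rw [hacc, List.set_append_right _ _ (by simp)]
      simp only [hlenpre, Nat.sub_self]
      have hrep : (List.replicate (S.length - k) (0 : Int)).set 0 ((bestIdx S k : Nat) : Int)
          = ((bestIdx S k : Nat) : Int) :: List.replicate (S.length - (k + 1)) 0 := by
        rw [show S.length - k = (S.length - (k + 1)) + 1 by omega]
        simp [List.replicate_succ]
      rw [hrep, List.range_succ, List.map_append]
      simp

-- ===== VERDICT (by name: the statement is the Claim_ definition above) =====
theorem cum_max_spec : Claim_equal_cum_max := by
  intro S _
  unfold Spec_cum_max
  rw [alt_eq_map]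
  cases hn : S.length with
  | zero =>
    unfold cum_max
    rw [hn]
    simp [PySem.List.pyRange_one_eq_nil]
  | succ n =>
    unfold cum_max
    have := a_invariant S S.length (by omega) le_rfl
    rw [this]
    simp [hn]
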